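-- pv_equiv track=rewrite | github.com/pauladkisson/PIC16A-Intro_to_Python_at_UCLA | PIC16A Python I/hw2.py | large_value_keys
-- ===== SOURCE A (Python) =====
-- def large_value_keys(d, N):
--     """Returns a list containing various keys in d.
--
--     d is a dictionary who values are ints. N is an int.
--     The list contains keys k whose corresponding value d[k] is bigger than N.
--     The keys are arranged in order of largest value to smallest value.
--     """
--     returnList = []
--     dictList = list(d.items())
--     dictList.sort(key = lambda x: -x[1])
--     keys = [entry[0] for entry in dictList]
--     for key in keys:
--         if d[key] > N:
--             returnList.append(key)
--     return returnList
-- ===== SOURCE B (Python) =====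
-- def large_value_keys(d, N):
--     buckets = {}
--     for k, v in d.items():
--         if v > N:
--             buckets.setdefault(v, []).append(k)
--     out = []
--     for v in sorted(buckets, reverse=True):
--         out.extend(buckets[v])
--     return out
-- ===== Notes on version B (the rewrite author's own statement) =====
-- stated objective: faster
-- what changed: A comparison-sorts all n items by negated value and then filters with a dict lookup per key; B never sorts the items: it groups the keys with value > N into a dict of value-indexed buckets in one pass, sorts only the distinct matching values descending, and concatenates the buckets.
import Mathlib
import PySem

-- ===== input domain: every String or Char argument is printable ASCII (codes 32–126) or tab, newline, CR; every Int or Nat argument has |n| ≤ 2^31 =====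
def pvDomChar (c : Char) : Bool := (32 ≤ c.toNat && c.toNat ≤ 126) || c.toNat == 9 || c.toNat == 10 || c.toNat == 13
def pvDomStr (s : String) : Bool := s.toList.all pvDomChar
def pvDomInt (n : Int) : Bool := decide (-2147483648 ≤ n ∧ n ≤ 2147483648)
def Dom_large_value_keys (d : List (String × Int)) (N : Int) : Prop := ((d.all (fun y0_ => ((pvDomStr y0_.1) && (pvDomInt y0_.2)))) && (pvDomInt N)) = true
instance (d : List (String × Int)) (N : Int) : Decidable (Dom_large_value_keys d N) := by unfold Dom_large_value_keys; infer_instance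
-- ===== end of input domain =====

-- B groups the keys whose value exceeds N into buckets indexed by value and concatenates the
-- buckets over the sorted distinct values (descending), instead of A's comparison sort of all
-- items followed by a filtering pass with a dict lookup per key. Equivalence is on the return value.

-- ===== PORT A =====
-- d[key] in A: first-match lookup in the association list (keys are unique under Pre_, and
-- every looked-up key comes from d itself, so the `none` branch is unreachable).
def pyLookup (d : List (String × Int)) (k : String) : Int :=
  match d.find? (fun p => p.1 == k) with
  | some p => p.2
  | none => 0

def large_value_keys (d : List (String × Int)) (N : Int) : List String :=
  let returnList : List String := []
  let dictList := PySem.List.sorted d (fun x => -x.2)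
  let keys := dictList.map (fun entry => entry.1)
  keys.foldl (fun acc key => if pyLookup d key > N then acc ++ [key] else acc) returnList

-- ===== PORT B =====
def large_value_keys_alt (d : List (String × Int)) (N : Int) : List String :=
  let buckets := d.foldl
    (fun b p => if p.2 > N then b.modify p.2 [] (fun l => l ++ [p.1]) else b)
    (PySem.Dict.empty : PySem.Dict Int (List String))
  let svals := PySem.List.sorted buckets.keys (fun v => v) true
  svals.foldl (fun out v => out ++ buckets.getD v []) []

-- ===== PRECONDITION & SPEC =====
-- Pre_: keys are pairwise distinct — a Python dict cannot hold duplicate keys, so an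
-- association list with duplicates encodes no Python input of A.
def Pre_large_value_keys (d : List (String × Int)) (N : Int) : Prop :=
  (d.map Prod.fst).Nodup
instance (d : List (String × Int)) (N : Int) : Decidable (Pre_large_value_keys d N) := by
  unfold Pre_large_value_keys; infer_instance
def pvWitness_large_value_keys : (List (String × Int)) × Int := ([("a", 5), ("b", 2), ("c", 7)], 3)

def Spec_large_value_keys (d : List (String × Int)) (N : Int) (out : List String) : Prop := out = large_value_keys_alt d N
instance (d : List (String × Int)) (N : Int) (out : List String) : Decidable (Spec_large_value_keys d N out) := by unfold Spec_large_value_keys; infer_instance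

-- ===== CLAIM (what is proved, stated in full; the proofs are below) =====
def Claim_equal_large_value_keys : Prop := ∀ (d : List (String × Int)) (N : Int), Dom_large_value_keys d N → Pre_large_value_keys d N → Spec_large_value_keys d N (large_value_keys d N)

-- ===== LEMMAS AND PROOFS =====

-- first-match lookup of a member's key returns that member's value when keys are nodup
theorem pyLookup_mem (d : List (String × Int)) (p : String × Int)
    (hnd : (d.map Prod.fst).Nodup) (hp : p ∈ d) : pyLookup d p.1 = p.2 := by
  induction d with
  | nil => cases hp
  | cons q t ih =>
    simp only [List.map_cons, List.nodup_cons] at hnd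
    rcases List.mem_cons.mp hp with h | h
    · subst h; simp [pyLookup]
    · have hne : q.1 ≠ p.1 := by
        intro he
        apply hnd.1
        rw [he]
        exact List.mem_map_of_mem (f := Prod.fst) h
      have : (q.1 == p.1) = false := by simp [hne]
      simp only [pyLookup, List.find?_cons, this]
      exact ih hnd.2 h

-- filtering drops an element inserted by insertBy when the test fails
theorem filter_insertBy_neg {α : Type} (b : α → α → Bool) (q : α → Bool) (x : α)
    (acc : List α) (hx : q x = false) :
    (PySem.List.insertBy b x acc).filter q = acc.filter q := by
  induction acc with
  | nil => simp [PySem.List.insertBy, hx]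
  | cons y ys ih =>
    by_cases hb : b x y = true
    · simp [PySem.List.insertBy, hb, hx]
    · simp only [Bool.not_eq_true] at hb
      simp only [PySem.List.insertBy, hb]
      by_cases hy : q y = true <;> simp [hy, ih]

-- filtering commutes with insertBy into a key-sorted accumulator, when every kept element's
-- key is strictly below every dropped element's key
theorem filter_insertBy_pos (key : Prod String Int → Int) (q : Prod String Int → Bool)
    (hsep : ∀ x y, q x = true → q y = false → key x < key y)
    (x : Prod String Int) (acc : List (Prod String Int)) (hx : q x = true)
    (hs : acc.Pairwise (fun a b => key a ≤ key b)) :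
    (PySem.List.insertBy (fun a b => decide (key a < key b)) x acc).filter q
      = PySem.List.insertBy (fun a b => decide (key a < key b)) x (acc.filter q) := by
  induction acc with
  | nil => simp [PySem.List.insertBy, hx]
  | cons y ys ih =>
    rcases List.pairwise_cons.mp hs with ⟨hy, hys⟩
    by_cases hb : key x < key y
    · -- x goes in front of y
      by_cases hqy : q y = true
      · simp [PySem.List.insertBy, hb, hx, hqy]
      · simp only [Bool.not_eq_true] at hqy
        simp only [PySem.List.insertBy, decide_eq_true_eq, hb, List.filter_cons,
          hx, hqy, Bool.false_eq_true, if_false, if_pos trivial]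
        -- x is below every kept element of ys, so it stays in front
        cases hfys : ys.filter q with
        | nil => simp [PySem.List.insertBy]
        | cons z zs =>
          have hz : z ∈ ys.filter q := by rw [hfys]; exact List.mem_cons_self
          have hzy : key y ≤ key z := hy z (List.mem_of_mem_filter hz)
          have : key x < key z := lt_of_lt_of_le hb hzy
          simp [PySem.List.insertBy, this]
    · -- x goes after y
      have hqy : q y = true := by
        by_contra h
        exact hb (hsep x y hx (Bool.not_eq_true (q y) ▸ eq_false_of_ne_true h))
      simp [PySem.List.insertBy, hb, hqy, ih hys]

-- insertBy preserves key-sortedness of the accumulator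
theorem insertBy_pairwise (key : Prod String Int → Int) (x : Prod String Int)
    (acc : List (Prod String Int)) (hs : acc.Pairwise (fun a b => key a ≤ key b)) :
    (PySem.List.insertBy (fun a b => decide (key a < key b)) x acc).Pairwise
      (fun a b => key a ≤ key b) := by
  induction acc with
  | nil => simp [PySem.List.insertBy]
  | cons y ys ih =>
    rcases List.pairwise_cons.mp hs with ⟨hy, hys⟩
    by_cases hb : key x < key y
    · simp only [PySem.List.insertBy, decide_eq_true_eq, hb, if_pos trivial]
      refine List.pairwise_cons.mpr ⟨?_, hs⟩
      intro z hz
      rcases List.mem_cons.mp hz with h | h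
      · exact le_of_lt (h ▸ hb)
      · exact le_of_lt (lt_of_lt_of_le hb (hy z h))
    · simp only [PySem.List.insertBy, decide_eq_true_eq, hb]
      refine List.pairwise_cons.mpr ⟨?_, ih hys⟩
      intro z hz
      rcases (PySem.List.mem_insertBy _ _ _ _).mp hz with h | h
      · exact h ▸ le_of_not_gt hb
      · exact hy z h

-- filtering commutes with the insertion-sort fold
theorem filter_foldl_insertBy (key : Prod String Int → Int) (q : Prod String Int → Bool)
    (hsep : ∀ x y, q x = true → q y = false → key x < key y)
    (l acc : List (Prod String Int)) (hs : acc.Pairwise (fun a b => key a ≤ key b)) :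
    (l.foldl (fun acc x => PySem.List.insertBy (fun a b => decide (key a < key b)) x acc) acc).filter q
      = (l.filter q).foldl (fun acc x => PySem.List.insertBy (fun a b => decide (key a < key b)) x acc) (acc.filter q) := by
  induction l generalizing acc with
  | nil => simp
  | cons x l ih =>
    simp only [List.foldl_cons, List.filter_cons]
    by_cases hx : q x = true
    · rw [ih _ (insertBy_pairwise key x acc hs),
        filter_insertBy_pos key q hsep x acc hx hs]
      simp [hx]
    · simp only [Bool.not_eq_true] at hx
      rw [ih _ (insertBy_pairwise key x acc hs), filter_insertBy_neg _ q x acc hx]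
      simp [hx]

-- stable sort commutes with the value filter (the separation property holds for key = -value)
theorem sorted_filter_comm (d : List (String × Int)) (N : Int) :
    (PySem.List.sorted d (fun x => -x.2)).filter (fun p => decide (p.2 > N))
      = PySem.List.sorted (d.filter (fun p => decide (p.2 > N))) (fun x => -x.2) := by
  rw [PySem.List.sorted_eq_foldl_insertBy, PySem.List.sorted_eq_foldl_insertBy]
  have := filter_foldl_insertBy (fun x => -x.2) (fun p => decide (p.2 > N))
    (by intro x y hx hy; simp only [decide_eq_true_eq] at hx
        simp only [decide_eq_false_iff_not, not_lt] at hy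
        show -x.2 < -y.2; omega)
    d [] (by simp)
  simpa using this

-- insertBy skips a prefix none of whose elements trigger the insertion test
theorem insertBy_append_left {α : Type} (b : α → α → Bool) (x : α) (pre L : List α)
    (h : ∀ y ∈ pre, b x y = false) :
    PySem.List.insertBy b x (pre ++ L) = pre ++ PySem.List.insertBy b x L := by
  induction pre with
  | nil => simp
  | cons y ys ih =>
    have hy : b x y = false := h y List.mem_cons_self
    simp only [List.cons_append, PySem.List.insertBy, hy, Bool.false_eq_true, if_false]
    rw [ih (fun z hz => h z (List.mem_cons_of_mem y hz))]

-- insertBy puts x in front when every element triggers the insertion test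
theorem insertBy_cons_of_forall {α : Type} (b : α → α → Bool) (x : α) (L : List α)
    (h : ∀ y ∈ L, b x y = true) :
    PySem.List.insertBy b x L = x :: L := by
  cases L with
  | nil => rfl
  | cons y ys => simp [PySem.List.insertBy, h y List.mem_cons_self]

-- appending one element to the input of the stable insertion sort
theorem sorted_append_singleton (key : Prod String Int → Int)
    (l : List (Prod String Int)) (x : Prod String Int) :
    PySem.List.sorted (l ++ [x]) key
      = PySem.List.insertBy (fun a b => decide (key a < key b)) x (PySem.List.sorted l key) := by
  rw [PySem.List.sorted_eq_foldl_insertBy, PySem.List.sorted_eq_foldl_insertBy,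
    List.foldl_append]
  rfl

-- a stable sort puts the block of minimal-key elements first, in input order
theorem sorted_extract_min (key : Prod String Int → Int) (m : Int) :
    ∀ (f : List (Prod String Int)), (∀ p ∈ f, m ≤ key p) →
    PySem.List.sorted f key
      = f.filter (fun x => key x == m)
        ++ PySem.List.sorted (f.filter (fun x => !(key x == m))) key := by
  intro f
  induction f using List.reverseRecOn with
  | nil => intro _; simp
  | append_singleton g x ih =>
    intro h
    have hg : ∀ p ∈ g, m ≤ key p := fun p hp => h p (List.mem_append_left _ hp)
    rw [sorted_append_singleton, ih hg, List.filter_append, List.filter_append]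
    by_cases hx : key x = m
    · have hx' : (key x == m) = true := by simp [hx]
      rw [insertBy_append_left _ _ _ _ (by
        intro y hy
        have : key y = m := by
          have := List.of_mem_filter hy
          simpa using this
        simp [hx, this])]
      rw [insertBy_cons_of_forall _ _ _ (by
        intro y hy
        have hy' : y ∈ g.filter (fun x => !(key x == m)) :=
          (PySem.List.mem_sorted _ _ _ _).mp hy
        have h1 : m ≤ key y := hg y (List.mem_of_mem_filter hy')
        have h2 : ¬ key y = m := by
          have := List.of_mem_filter hy'
          simpa using this
        simp only [decide_eq_true_eq, hx]
        omega)]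
      simp [hx']
    · have hx' : (key x == m) = false := by simp [hx]
      have hxm : m < key x := lt_of_le_of_ne (h x (List.mem_append_right _ List.mem_cons_self)) (Ne.symm hx)
      rw [insertBy_append_left _ _ _ _ (by
        intro y hy
        have : key y = m := by
          have := List.of_mem_filter hy
          simpa using this
        simp only [decide_eq_false_iff_not, this]
        omega)]
      rw [← sorted_append_singleton]
      simp [hx']

-- a stable sort by descending value is the concatenation of the value buckets, taken over any
-- strictly decreasing list of values covering all values of the input
theorem sorted_eq_buckets :
    ∀ (V : List Int) (f : List (Prod String Int)),
      V.Pairwise (fun a b => b < a) → (∀ p ∈ f, p.2 ∈ V) →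
      PySem.List.sorted f (fun x => -x.2)
        = V.flatMap (fun v => f.filter (fun x => x.2 == v)) := by
  intro V
  induction V with
  | nil =>
    intro f _ hmem
    cases f with
    | nil => rfl
    | cons p t => exact absurd (hmem p List.mem_cons_self) (List.not_mem_nil)
  | cons v V' ih =>
    intro f hpw hmem
    rcases List.pairwise_cons.mp hpw with ⟨hv, hpw'⟩
    have hmin : ∀ p ∈ f, -v ≤ -p.2 := by
      intro p hp
      rcases List.mem_cons.mp (hmem p hp) with h | h
      · omega
      · have := hv _ h; omega
    have hext := sorted_extract_min (fun x => -x.2) (-v) f hmin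
    have hbeq : ∀ p : String × Int, ((-p.2 : Int) == -v) = (p.2 == v) := by
      intro p
      rw [Bool.eq_iff_iff]
      simp only [beq_iff_eq]
      omega
    have heq1 : f.filter (fun x => -x.2 == -v) = f.filter (fun x => x.2 == v) := by
      apply List.filter_congr; intro p _; exact hbeq p
    have heq2 : f.filter (fun x => !(-x.2 == -v)) = f.filter (fun x => !(x.2 == v)) := by
      apply List.filter_congr; intro p _; rw [hbeq p]
    rw [heq1, heq2] at hext
    have hmem' : ∀ p ∈ f.filter (fun x => !(x.2 == v)), p.2 ∈ V' := by
      intro p hp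
      have h1 := List.mem_of_mem_filter hp
      have h2 : ¬ p.2 = v := by
        have := List.of_mem_filter hp
        simpa using this
      rcases List.mem_cons.mp (hmem p h1) with h | h
      · exact absurd h h2
      · exact h
    rw [hext, ih _ hpw' hmem', List.flatMap_cons]
    congr 1
    rw [List.flatMap_def, List.flatMap_def]
    congr 1
    apply List.map_congr_left
    intro w hw
    rw [List.filter_filter]
    apply List.filter_congr
    intro p _
    have hwv : w ≠ v := by
      have := hv w hw; omega
    rw [Bool.eq_iff_iff]
    simp only [Bool.and_eq_true, beq_iff_eq, Bool.not_eq_eq_eq_not, Bool.not_true,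
      beq_eq_false_iff_ne, ne_eq]
    constructor
    · rintro ⟨h1, _⟩; exact h1
    · intro h1; exact ⟨h1, by rw [h1]; exact hwv⟩

-- the grouping loop's bucket at v holds the first components of the entries with value v, in order
theorem bucket_getD (F : List (String × Int)) (v : Int) :
    (F.foldl (fun b p => b.modify p.2 [] (fun l => l ++ [p.1]))
        (PySem.Dict.empty : PySem.Dict Int (List String))).getD v []
      = (F.filter (fun x => x.2 == v)).map (fun p => p.1) := by
  have hmap : F.foldl (fun b p => b.modify p.2 [] (fun l => l ++ [p.1]))
        (PySem.Dict.empty : PySem.Dict Int (List String))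
      = (F.map Prod.swap).foldl (fun b q => b.modify q.1 [] (fun l => l ++ [q.2]))
        (PySem.Dict.empty : PySem.Dict Int (List String)) := by
    rw [List.foldl_map]
    simp only [Prod.fst_swap, Prod.snd_swap]
  rw [hmap, PySem.Dict.getD_foldl_modify_append]
  simp [List.filter_map, List.map_map, Function.comp_def]

-- the grouping loop's keys are the distinct values, in first-occurrence order
theorem bucket_keys (F : List (String × Int)) :
    (F.foldl (fun b p => b.modify p.2 [] (fun l => l ++ [p.1]))
        (PySem.Dict.empty : PySem.Dict Int (List String))).keys
      = PySem.Set.ofList (F.map (fun p => p.2)) := by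
  rw [PySem.Dict.keys_foldl_modify_key (key := fun p : String × Int => p.2)]
  rw [PySem.Dict.keys_empty, PySem.Set.ofList_eq_foldl]
  rfl

-- B computed in closed form: buckets concatenated over the sorted distinct filtered values
theorem alt_eq (d : List (String × Int)) (N : Int) :
    large_value_keys_alt d N
      = ((PySem.List.sorted
            (PySem.Set.ofList ((d.filter (fun p => decide (p.2 > N))).map (fun p => p.2)))
            (fun v => v) true).flatMap
          (fun v => (d.filter (fun p => decide (p.2 > N))).filter (fun x => x.2 == v))).map
          (fun p => p.1) := by
  unfold large_value_keys_alt
  simp only []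
  rw [PySem.List.foldl_ite_eq_foldl_filter]
  rw [bucket_keys, PySem.List.foldl_append_eq_flatMap]
  rw [List.map_flatMap]
  simp only [List.nil_append]
  rw [List.flatMap_def, List.flatMap_def]
  congr 1
  apply List.map_congr_left
  intro v _
  rw [bucket_getD]

-- ===== VERDICT (by name: the statement is the Claim_ definition above) =====
theorem large_value_keys_spec : Claim_equal_large_value_keys := by
  intro d N _ hpre
  unfold Spec_large_value_keys large_value_keys
  simp only []
  rw [PySem.List.foldl_append_ite_eq_filter (fun k => pyLookup d k > N)]
  simp only [List.nil_append]
  rw [List.filter_map]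
  have hcong : ((PySem.List.sorted d (fun x => -x.2)).filter
      (fun p => decide (pyLookup d p.1 > N)))
      = (PySem.List.sorted d (fun x => -x.2)).filter (fun p => decide (p.2 > N)) := by
    apply List.filter_congr
    intro p hp
    have hm : p ∈ d := (PySem.List.mem_sorted _ _ _ _).mp hp
    rw [pyLookup_mem d p hpre hm]
  simp only [Function.comp_def]
  rw [hcong, sorted_filter_comm]
  -- now the A side is (sorted F (-value)).map fst with F the filtered entries
  have hVnd : (PySem.List.sorted
      (PySem.Set.ofList ((d.filter (fun p => decide (p.2 > N))).map (fun p => p.2)))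
      (fun v => v) true).Nodup :=
    ((PySem.List.sorted_perm _ _ _).symm).nodup
      (PySem.Set.nodup_ofList _)
  have hVpw : (PySem.List.sorted
      (PySem.Set.ofList ((d.filter (fun p => decide (p.2 > N))).map (fun p => p.2)))
      (fun v => v) true).Pairwise (fun a b => b < a) := by
    have h1 := PySem.List.sorted_pairwise_rev
      (PySem.Set.ofList ((d.filter (fun p => decide (p.2 > N))).map (fun p => p.2)))
      (fun v => v)
    exact (h1.and hVnd).imp (fun h => lt_of_le_of_ne h.1 (fun he => h.2 he.symm))
  have hVmem : ∀ p ∈ d.filter (fun p => decide (p.2 > N)),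
      p.2 ∈ PySem.List.sorted
        (PySem.Set.ofList ((d.filter (fun p => decide (p.2 > N))).map (fun p => p.2)))
        (fun v => v) true := by
    intro p hp
    rw [PySem.List.mem_sorted, PySem.Set.mem_ofList]
    exact List.mem_map_of_mem hp
  rw [sorted_eq_buckets _ _ hVpw hVmem, alt_eq]
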